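-- pv_equiv track=rewrite | github.com/fkvasir/learn-python | applications-samples/trnsltion.py | add_lang
-- ===== SOURCE A (Python) =====
-- def add_lang(sentence):
--   lngge = ""
--   for lett in sentence:
--     if lett.upper() in "AEIOU":
--       if lett.islower():
--         lngge = lngge + "ba"
--       else:
--         lngge = lngge + "Ba"
--     else:
--       lngge = lngge + lett
--   return lngge
-- ===== SOURCE B (Python) =====
-- _TABLE = str.maketrans({v: "ba" for v in "aeiou"} | {v.upper(): "Ba" for v in "aeiou"})
--
-- def add_lang(sentence):
--     return sentence.translate(_TABLE)
-- ===== Notes on version B (the rewrite author's own statement) =====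
-- stated objective: idiomatic
-- what changed: Replaces the explicit per-character loop with case/vowel branching by a translation table built once and applied in a single str.translate pass (C-level loop, measured faster).
import Mathlib
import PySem

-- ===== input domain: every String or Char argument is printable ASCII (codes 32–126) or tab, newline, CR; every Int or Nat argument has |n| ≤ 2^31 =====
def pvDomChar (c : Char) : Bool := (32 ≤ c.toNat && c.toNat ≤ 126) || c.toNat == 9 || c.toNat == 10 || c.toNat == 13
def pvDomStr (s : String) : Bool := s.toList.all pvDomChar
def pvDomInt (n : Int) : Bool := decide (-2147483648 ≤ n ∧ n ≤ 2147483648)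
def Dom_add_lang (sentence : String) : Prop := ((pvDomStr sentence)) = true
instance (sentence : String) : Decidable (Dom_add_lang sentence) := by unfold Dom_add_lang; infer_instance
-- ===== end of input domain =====

set_option maxRecDepth 20000


-- B replaces A's per-character branching loop with a translation table applied in one
-- table-driven pass (str.translate); objective: idiomatic.

-- ===== PORT A =====
-- 'lett.upper() in "AEIOU"': lett is one char, so on ASCII the substring test is
-- exactly membership of the uppercased char in the five vowel letters.
def add_lang (sentence : String) : String :=
  sentence.toList.foldl
    (fun lngge lett =>
      if ("AEIOU".toList.contains (PySem.Chars.upperChar lett)) then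
        if PySem.Chars.islower lett then lngge ++ "ba" else lngge ++ "Ba"
      else lngge ++ String.ofList [lett])
    ""

-- ===== PORT B =====
-- _TABLE = str.maketrans({v:"ba" for v in "aeiou"} | {v.upper():"Ba" for v in "aeiou"})
def pvT1 : PySem.Dict Char String :=
  "aeiou".toList.foldl (fun d v => d.insert v "ba") PySem.Dict.empty
def pvT2 : PySem.Dict Char String :=
  "aeiou".toList.foldl (fun d v => d.insert (PySem.Chars.upperChar v) "Ba") PySem.Dict.empty
def pvTable : PySem.Dict Char String :=
  pvT2.items.foldl (fun d kv => d.insert kv.1 kv.2) pvT1   -- dict union '|': right overwrites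

-- sentence.translate(_TABLE): each char mapped through the table, unmapped chars kept
def add_lang_alt (sentence : String) : String :=
  String.ofList (sentence.toList.flatMap
    (fun c => ((pvTable.get? c).getD (String.ofList [c])).toList))

-- ===== PRECONDITION & SPEC =====
def Spec_add_lang (sentence : String) (out : String) : Prop := out = add_lang_alt sentence
instance (sentence : String) (out : String) : Decidable (Spec_add_lang sentence out) := by unfold Spec_add_lang; infer_instance

-- ===== CLAIM (what is proved, stated in full; the proofs are below) =====
def Claim_equal_add_lang : Prop := ∀ (sentence : String), Dom_add_lang sentence → Spec_add_lang sentence (add_lang sentence)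

-- ===== LEMMAS AND PROOFS =====

-- A's per-character contribution, as a list of chars
def pvStepA (c : Char) : List Char :=
  if ("AEIOU".toList.contains (PySem.Chars.upperChar c)) then
    if PySem.Chars.islower c then ['b','a'] else ['B','a']
  else [c]

-- B's per-character contribution
def pvStepB (c : Char) : List Char :=
  ((pvTable.get? c).getD (String.ofList [c])).toList

theorem pvStep_eq_range : ∀ n ∈ List.range 128, pvStepA (Char.ofNat n) = pvStepB (Char.ofNat n) := by
  decide

theorem pvStep_eq (c : Char) (h : pvDomChar c = true) : pvStepA c = pvStepB c := by
  have hlt : c.toNat < 128 := by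
    simp only [pvDomChar, Bool.or_eq_true, Bool.and_eq_true, decide_eq_true_eq,
      Nat.beq_eq_true_eq] at h
    omega
  have := pvStep_eq_range c.toNat (List.mem_range.mpr hlt)
  rwa [Char.ofNat_toNat] at this

theorem pvFoldlA (l : List Char) (acc : String) :
    l.foldl
      (fun lngge lett =>
        if ("AEIOU".toList.contains (PySem.Chars.upperChar lett)) then
          if PySem.Chars.islower lett then lngge ++ "ba" else lngge ++ "Ba"
        else lngge ++ String.ofList [lett])
      acc
    = acc ++ String.ofList (l.flatMap pvStepA) := by
  induction l generalizing acc with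
  | nil => simp
  | cons c t ih =>
    simp only [List.foldl_cons, ih, List.flatMap_cons, pvStepA]
    split_ifs <;> simp [String.ext_iff, String.toList_append]

theorem pvFlatMap_eq (l : List Char) (h : l.all pvDomChar = true) :
    l.flatMap pvStepA = l.flatMap pvStepB := by
  induction l with
  | nil => rfl
  | cons c t ih =>
    simp only [List.all_cons, Bool.and_eq_true] at h
    simp [List.flatMap_cons, pvStep_eq c h.1, ih h.2]

-- ===== VERDICT (by name: the statement is the Claim_ definition above) =====
theorem add_lang_spec : Claim_equal_add_lang := by
  intro s hdom
  unfold Spec_add_lang add_lang add_lang_alt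
  rw [pvFoldlA, pvFlatMap_eq s.toList hdom]
  simp only [String.ext_iff, String.toList_append, String.toList_ofList]
  show [] ++ _ = _
  rw [List.nil_append]
  rfl
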